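-- pv_equiv track=rewrite | github.com/drewc611/New- | backend/app/tools/address_noise.py | _strip_trailing_country
-- ===== SOURCE A (Python) =====
-- _COUNTRY_SUFFIXES: tuple[str, ...] = (
--     "united states of america",
--     "united states",
--     "u s a",
--     "u.s.a.",
--     "u s",
--     "u.s.",
--     "usa",
-- )
--
-- def _strip_trailing_country(text: str) -> str:
--     lowered = text.rstrip().lower()
--     for suffix in _COUNTRY_SUFFIXES:
--         if lowered.endswith(suffix):
--             cut = len(text.rstrip()) - len(suffix)
--             text = text.rstrip()[:cut].rstrip(" ,")
--             break
--     return text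
-- ===== SOURCE B (Python) =====
-- _COUNTRY_SUFFIXES: tuple[str, ...] = (
--     "united states of america",
--     "united states",
--     "u s a",
--     "u.s.a.",
--     "u s",
--     "u.s.",
--     "usa",
-- )
--
--
-- def _strip_trailing_country(text: str) -> str:
--     # Simultaneous backward multi-pattern scan: walk the (rstripped, lowered)
--     # string from its end one character at a time, pruning the set of still-viable
--     # reversed suffixes per character, instead of testing each suffix with endswith.
--     s = text.rstrip()
--     rev = s.lower()[::-1]
--     cands = [suf[::-1] for suf in _COUNTRY_SUFFIXES]
--     n = len(rev)
--     i = 0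
--     result = None
--     while cands:
--         if any(not c for c in cands):
--             result = i
--             break
--         if i == n:
--             break
--         cands = [c[1:] for c in cands if c[0] == rev[i]]
--         i += 1
--     if result is None:
--         return text
--     return s[:len(s) - result].rstrip(" ,")
-- ===== Notes on version B (the rewrite author's own statement) =====
-- stated objective: alternative
-- what changed: Replaces A's per-suffix endswith loop over the tuple by a single backward character-by-character scan of the rstripped+lowered string that prunes a set of still-viable reversed suffixes at each character (simultaneous multi-pattern matching).
import Mathlib
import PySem

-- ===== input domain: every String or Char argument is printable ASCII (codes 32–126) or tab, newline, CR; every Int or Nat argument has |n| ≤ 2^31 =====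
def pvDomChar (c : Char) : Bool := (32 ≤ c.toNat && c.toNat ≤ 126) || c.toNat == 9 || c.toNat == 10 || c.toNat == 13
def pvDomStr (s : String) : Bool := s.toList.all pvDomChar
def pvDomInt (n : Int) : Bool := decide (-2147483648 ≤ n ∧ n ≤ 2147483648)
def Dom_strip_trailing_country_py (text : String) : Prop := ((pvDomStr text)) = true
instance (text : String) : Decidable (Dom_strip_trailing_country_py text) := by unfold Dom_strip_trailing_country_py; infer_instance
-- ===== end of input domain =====

set_option maxHeartbeats 1000000


-- B replaces A's per-suffix endswith loop by a single backward character scan that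
-- prunes the set of viable (reversed) suffixes one character at a time
-- (objective: alternative; same return value everywhere).

-- shared primitive: exact port of Python's str.rstrip(" ,") — remove trailing ' ' and ',' characters
def pvRstripSpaceComma (cs : List Char) : List Char :=
  (cs.reverse.dropWhile (fun c => c == ' ' || c == ',')).reverse

-- _COUNTRY_SUFFIXES, in tuple order (as lists of chars)
def pvSuffixes : List (List Char) :=
  ["united states of america".toList, "united states".toList, "u s a".toList,
   "u.s.a.".toList, "u s".toList, "u.s.".toList, "usa".toList]

-- ===== PORT A =====
-- the for-loop with break: return at the first suffix lowered ends with
def pvLoopA (text : String) (stripped lowered : List Char) : List (List Char) → String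
  | [] => text
  | suf :: rest =>
    if PySem.Chars.endswith lowered suf then
      -- cut = len(text.rstrip()) - len(suffix); text.rstrip()[:cut].rstrip(" ,")
      String.ofList (pvRstripSpaceComma
        (PySem.List.slice stripped none (some ((stripped.length : Int) - (suf.length : Int)))))
    else pvLoopA text stripped lowered rest

def strip_trailing_country_py (text : String) : String :=
  let stripped := PySem.Chars.rstrip text.toList
  let lowered := PySem.Chars.lower stripped
  pvLoopA text stripped lowered pvSuffixes

-- ===== PORT B =====
-- the while loop: consume one char of rev per step, pruning cands; 'some i' = match of length i
def pvScan (rev : List Char) (cands : List (List Char)) (i : Nat) : Option Nat :=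
  if cands.isEmpty then none
  else if cands.any List.isEmpty then some i
  else
    match rev with
    | [] => none
    | ch :: rest =>
      pvScan rest ((cands.filter (fun c => c.head? == some ch)).map List.tail) (i + 1)

def strip_trailing_country_py_alt (text : String) : String :=
  let s := PySem.Chars.rstrip text.toList
  let rev := (PySem.Chars.lower s).reverse
  match pvScan rev (pvSuffixes.map List.reverse) 0 with
  | none => text
  | some k =>
    String.ofList (pvRstripSpaceComma
      (PySem.List.slice s none (some ((s.length : Int) - (k : Int)))))

-- ===== PRECONDITION & SPEC =====
def Spec_strip_trailing_country_py (text : String) (out : String) : Prop := out = strip_trailing_country_py_alt text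
instance (text : String) (out : String) : Decidable (Spec_strip_trailing_country_py text out) := by unfold Spec_strip_trailing_country_py; infer_instance

-- ===== CLAIM (what is proved, stated in full; the proofs are below) =====
def Claim_equal_strip_trailing_country_py : Prop := ∀ (text : String), Dom_strip_trailing_country_py text → Spec_strip_trailing_country_py text (strip_trailing_country_py text)

-- ===== LEMMAS AND PROOFS =====

-- soundness of the scan: a reported match of length m - i is a candidate that is a prefix of rev
theorem pvScan_sound (rev : List Char) (cands : List (List Char)) (i m : Nat)
    (h : pvScan rev cands i = some m) : ∃ c ∈ cands, c.length + i = m ∧ c <+: rev := by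
  induction rev generalizing cands i with
  | nil =>
    rw [pvScan] at h
    split_ifs at h with h1 h2
    · obtain ⟨c, hc, he⟩ := List.any_eq_true.mp h2
      exact ⟨c, hc, by simp_all [List.isEmpty_iff], by simp_all [List.isEmpty_iff]⟩
  | cons ch rest ih =>
    rw [pvScan] at h
    split_ifs at h with h1 h2
    · obtain ⟨c, hc, he⟩ := List.any_eq_true.mp h2
      exact ⟨c, hc, by simp_all [List.isEmpty_iff], by simp_all [List.isEmpty_iff]⟩
    · obtain ⟨c', hc', hl, hp⟩ := ih _ _ h
      obtain ⟨c, hc, rfl⟩ := List.mem_map.mp hc'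
      have hmem := List.mem_filter.mp hc
      have hh : c.head? = some ch := by simpa using hmem.2
      obtain ⟨c0, rfl⟩ : ∃ c0, c = ch :: c0 := by
        cases c with
        | nil => simp at hh
        | cons a b => simp at hh; exact ⟨b, by rw [hh]⟩
      refine ⟨ch :: c0, hmem.1, ?_, by simpa using hp⟩
      simp only [List.tail_cons] at hl
      simp only [List.length_cons]
      omega

-- completeness of the scan: a candidate that is a prefix of rev guarantees a match
theorem pvScan_complete (c : List Char) (rev : List Char) (cands : List (List Char)) (i : Nat)
    (hc : c ∈ cands) (hp : c <+: rev) : pvScan rev cands i ≠ none := by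
  induction c generalizing rev cands i with
  | nil =>
    rw [pvScan.eq_def]
    have h1 : cands.isEmpty = false := by
      cases cands with
      | nil => simp at hc
      | cons a b => rfl
    have h2 : cands.any List.isEmpty = true := List.any_eq_true.mpr ⟨[], hc, by simp⟩
    simp [h1, h2]
  | cons ch c0 ih =>
    obtain ⟨rest, hrev⟩ : ∃ rest, rev = ch :: rest := by
      cases rev with
      | nil => simp at hp
      | cons a b =>
        obtain ⟨t, ht⟩ := hp
        injection ht with h1 h2
        exact ⟨b, by rw [h1]⟩
    subst hrev
    rw [pvScan.eq_def]
    split_ifs with h1 h2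
    · rw [List.isEmpty_iff] at h1; simp [h1] at hc
    · simp
    · refine ih rest _ (i + 1) ?_ ?_
      · exact List.mem_map.mpr ⟨ch :: c0, List.mem_filter.mpr ⟨hc, by simp⟩, rfl⟩
      · obtain ⟨t, ht⟩ := hp
        injection ht with _ h2'
        exact ⟨t, h2'⟩

-- A's loop: if no suffix matches, text is returned unchanged
theorem pvLoopA_none (text : String) (s low : List Char) (L : List (List Char))
    (h : ∀ suf ∈ L, PySem.Chars.endswith low suf = false) :
    pvLoopA text s low L = text := by
  induction L with
  | nil => rfl
  | cons suf rest ih =>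
    rw [pvLoopA, h suf (by simp), ih (fun x hx => h x (by simp [hx]))]
    simp

-- A's loop: if exactly one element matches, its cut is returned
theorem pvLoopA_found (text : String) (s low : List Char) (L : List (List Char)) (suf : List Char)
    (hm : suf ∈ L) (he : PySem.Chars.endswith low suf = true)
    (ho : ∀ s' ∈ L, s' ≠ suf → PySem.Chars.endswith low s' = false) :
    pvLoopA text s low L = String.ofList (pvRstripSpaceComma
      (PySem.List.slice s none (some ((s.length : Int) - (suf.length : Int))))) := by
  induction L with
  | nil => simp at hm
  | cons a rest ih =>
    rw [pvLoopA]
    by_cases hae : a = suf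
    · subst hae; simp [he]
    · rw [ho a (by simp) hae]
      simp only [Bool.false_eq_true, if_false]
      exact ih (by simp at hm; tauto) (fun x hx hne => ho x (by simp [hx]) hne)

-- two distinct country suffixes never both match the same string
theorem pvUnique (low : List Char) {s1 s2 : List Char}
    (h1 : s1 ∈ pvSuffixes) (h2 : s2 ∈ pvSuffixes)
    (hs1 : s1 <:+ low) (hs2 : s2 <:+ low) : s1 = s2 := by
  by_contra hne
  have hfact : ∀ a ∈ pvSuffixes, ∀ b ∈ pvSuffixes, a ≠ b → ¬ a <:+ b := by decide
  rcases List.suffix_or_suffix_of_suffix hs1 hs2 with h | h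
  · exact hfact s1 h1 s2 h2 hne h
  · exact hfact s2 h2 s1 h1 (Ne.symm hne) h

theorem pvMain (text : String) :
    strip_trailing_country_py text = strip_trailing_country_py_alt text := by
  simp only [strip_trailing_country_py, strip_trailing_country_py_alt]
  generalize PySem.Chars.rstrip text.toList = s
  generalize PySem.Chars.lower s = low
  rcases hscan : pvScan low.reverse (pvSuffixes.map List.reverse) 0 with _ | m
  · -- no match: every suffix fails endswith
    show pvLoopA text s low pvSuffixes = text
    refine pvLoopA_none text s low pvSuffixes (fun suf hsuf => ?_)
    rw [Bool.eq_false_iff]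
    intro he
    have hsfx := (PySem.Chars.endswith_iff _ _).mp he
    exact pvScan_complete suf.reverse low.reverse _ 0
      (List.mem_map.mpr ⟨suf, hsuf, rfl⟩) (List.reverse_prefix.mpr hsfx) hscan
  · -- match of length m
    obtain ⟨c, hc, hl, hp⟩ := pvScan_sound _ _ _ _ hscan
    obtain ⟨suf, hsuf, rfl⟩ := List.mem_map.mp hc
    have hsfx : suf <:+ low := List.reverse_prefix.mp hp
    have hlen : suf.length = m := by simpa using hl
    show pvLoopA text s low pvSuffixes = String.ofList (pvRstripSpaceComma
      (PySem.List.slice s none (some ((s.length : Int) - (m : Int)))))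
    rw [pvLoopA_found text s low pvSuffixes suf hsuf
      ((PySem.Chars.endswith_iff _ _).mpr hsfx)
      (fun s' hs' hne => by
        rw [Bool.eq_false_iff]
        intro he
        exact hne (pvUnique low hs' hsuf ((PySem.Chars.endswith_iff _ _).mp he) hsfx)),
      hlen]

-- ===== VERDICT (by name: the statement is the Claim_ definition above) =====
theorem strip_trailing_country_py_spec : Claim_equal_strip_trailing_country_py := by
  intro text _
  unfold Spec_strip_trailing_country_py
  exact pvMain text
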